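-- pv_equiv track=rewrite | github.com/mediator007/WebCamBotAiogram | utils/functions.py | for_next_bonus
-- ===== SOURCE A (Python) =====
-- def for_next_bonus(week_sum):
--     """
--     Расчет остатка до следующего бонуса
--     """
--     if week_sum < 400:
--         remains = 400 - week_sum
--         return remains
--
--     for i in range(450, 900, 50):
--         if i > week_sum:
--             remains = i - week_sum
--             return remains
--
--     if week_sum >= 850:
--         return 0
-- ===== SOURCE B (Python) =====
-- def for_next_bonus(week_sum):
--     """
--     Расчет остатка до следующего бонуса
--     """
--     if week_sum < 400:
--         return 400 - week_sum
--     if week_sum >= 850: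
--         return 0
--     nxt = 50 * (week_sum // 50 + 1)
--     return nxt - week_sum
-- ===== Notes on version B (the rewrite author's own statement) =====
-- stated objective: simpler
-- what changed: The fixed-range scan over range(450,900,50) is replaced by a closed-form next-threshold computation 50*(week_sum//50+1); the two guard branches are kept.
import Mathlib
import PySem

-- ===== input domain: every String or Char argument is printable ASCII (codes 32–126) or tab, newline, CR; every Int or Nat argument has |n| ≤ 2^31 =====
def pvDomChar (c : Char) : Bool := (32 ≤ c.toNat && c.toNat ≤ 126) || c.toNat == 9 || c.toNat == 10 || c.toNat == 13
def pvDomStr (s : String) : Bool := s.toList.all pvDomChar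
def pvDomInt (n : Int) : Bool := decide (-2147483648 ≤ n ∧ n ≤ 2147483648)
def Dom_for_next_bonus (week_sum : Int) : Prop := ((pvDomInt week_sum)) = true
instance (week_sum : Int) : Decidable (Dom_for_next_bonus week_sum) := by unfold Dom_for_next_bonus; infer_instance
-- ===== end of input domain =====

-- ===== PORT A =====
-- recursive scan over range(450,900,50): first i with i > week_sum
def forNextLoop (l : List Int) (week_sum : Int) : Option Int :=
  match l with
  | [] => none
  | i :: rest => if i > week_sum then some (i - week_sum) else forNextLoop rest week_sum

def for_next_bonus (week_sum : Int) : Int :=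
  if week_sum < 400 then 400 - week_sum
  else
    match forNextLoop (PySem.List.pyRange 450 900 50) week_sum with
    | some r => r
    | none => if week_sum ≥ 850 then 0 else 0
      -- the inner 'else 0' branch is unreachable (Python would fall off returning None):
      -- the loop only yields none when 850 ≤ week_sum

-- ===== PORT B =====
-- B: closed-form next multiple of 50 strictly above week_sum; header objective: simpler
def for_next_bonus_alt (week_sum : Int) : Int :=
  if week_sum < 400 then 400 - week_sum
  else if week_sum ≥ 850 then 0
  else 50 * (PySem.Int.floordiv week_sum 50 + 1) - week_sum

-- ===== PRECONDITION & SPEC =====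
def Spec_for_next_bonus (week_sum : Int) (out : Int) : Prop := out = for_next_bonus_alt week_sum
instance (week_sum : Int) (out : Int) : Decidable (Spec_for_next_bonus week_sum out) := by unfold Spec_for_next_bonus; infer_instance

-- ===== CLAIM (what is proved, stated in full; the proofs are below) =====
def Claim_equal_for_next_bonus : Prop := ∀ (week_sum : Int), Dom_for_next_bonus week_sum → Spec_for_next_bonus week_sum (for_next_bonus week_sum)

-- ===== LEMMAS AND PROOFS =====

-- ===== VERDICT (by name: the statement is the Claim_ definition above) =====
theorem for_next_bonus_spec : Claim_equal_for_next_bonus := by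
  intro w _
  unfold Spec_for_next_bonus for_next_bonus for_next_bonus_alt
  by_cases h1 : w < 400
  · simp [h1]
  · have hf : PySem.Int.floordiv w 50 = w / 50 :=
      PySem.Int.floordiv_eq_ediv_of_pos (by omega)
    simp only [hf, if_neg h1]
    have hr : PySem.List.pyRange 450 900 50
        = [450, 500, 550, 600, 650, 700, 750, 800, 850] := by decide
    rw [hr]
    simp only [forNextLoop]
    split_ifs <;> simp <;> omega
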